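-- pv_equiv track=rewrite | github.com/righthand0521/LeetCode | src/2536.py | rangeAddQueries
-- ===== SOURCE A (Python) =====
-- from typing import List, Optional
--
-- def rangeAddQueries(n: int, queries: List[List[int]]) -> List[List[int]]:
--     retVal = []
--
--     diff = [[0] * (n + 1) for _ in range(n + 1)]
--     for row1, col1, row2, col2 in queries:
--         diff[row1][col1] += 1
--         diff[row2 + 1][col1] -= 1
--         diff[row1][col2 + 1] -= 1
--         diff[row2 + 1][col2 + 1] += 1
--
--     retVal = [[0] * n for _ in range(n)]
--     for i in range(n):
--         for j in range(n):
--             x1 = 0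
--             if i != 0:
--                 x1 = retVal[i - 1][j]
--
--             x2 = 0
--             if j != 0:
--                 x2 = retVal[i][j - 1]
--
--             x3 = 0
--             if (i != 0) and (j != 0):
--                 x3 = retVal[i - 1][j - 1]
--
--             retVal[i][j] = diff[i][j] + x1 + x2 - x3
--
--     return retVal
-- ===== SOURCE B (Python) =====
-- from typing import List
--
--
-- def rangeAddQueries(n: int, queries: List[List[int]]) -> List[List[int]]:
--     # Direct simulation: walk each query's rectangle and bump every cell in it.
--     retVal = [[0] * n for _ in range(n)]
--     for row1, col1, row2, col2 in queries:
--         for i in range(row1, row2 + 1):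
--             for j in range(col1, col2 + 1):
--                 retVal[i][j] += 1
--     return retVal
-- ===== Notes on version B (the rewrite author's own statement) =====
-- stated objective: simpler
-- what changed: Drops the (n+1)x(n+1) difference array and the 2D prefix-sum reconstruction; B just walks each query's rectangle and increments every cell in it.
-- outside the precondition, e.g. on rangeAddQueries(2, [[-1, 0, 0, 0]]): A returns [[0, 0], [-1, 0]], B returns [[1, 0], [1, 0]]; on rangeAddQueries(2, [[1, 0, 0, 0]]): A returns [[0, 0], [0, 0]], B returns [[0, 0], [0, 0]]
import Mathlib
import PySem

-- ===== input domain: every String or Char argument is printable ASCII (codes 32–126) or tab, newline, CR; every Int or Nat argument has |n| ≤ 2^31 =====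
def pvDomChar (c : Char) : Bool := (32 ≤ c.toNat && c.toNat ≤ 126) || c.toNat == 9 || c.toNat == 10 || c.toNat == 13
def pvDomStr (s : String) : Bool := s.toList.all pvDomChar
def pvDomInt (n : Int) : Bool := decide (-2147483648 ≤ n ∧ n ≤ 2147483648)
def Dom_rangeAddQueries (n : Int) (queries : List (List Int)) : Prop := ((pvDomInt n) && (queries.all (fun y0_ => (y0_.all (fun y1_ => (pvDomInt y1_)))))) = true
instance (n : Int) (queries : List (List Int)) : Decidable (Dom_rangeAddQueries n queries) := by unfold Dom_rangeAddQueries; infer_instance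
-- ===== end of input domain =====

-- B replaces A's difference array + 2D prefix-sum reconstruction by directly walking each
-- query's rectangle and incrementing its cells (simpler; no speed claim).


-- ===== PORT A =====
-- Python's in-place `g[i][j] += v`; exact for the nonnegative in-range indices Pre_ guarantees
-- (out of range, List.modify is the identity; no admitted input reaches that).
def pvBump (g : List (List Int)) (i j v : Int) : List (List Int) :=
  g.modify i.toNat (fun row => row.modify j.toNat (fun x => x + v))

-- the four corner updates of one query (Python raises on other arities; unreachable under Pre_)
def pvApplyQuery (g : List (List Int)) (q : List Int) : List (List Int) :=
  match q with
  | [row1, col1, row2, col2] =>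
      pvBump (pvBump (pvBump (pvBump g row1 col1 1) (row2 + 1) col1 (-1))
        row1 (col2 + 1) (-1)) (row2 + 1) (col2 + 1) 1
  | _ => g

-- inner j-loop: retVal[i][j] = diff[i][j] + x1 + x2 - x3, reading x1,x3 from the previous
-- output row and x2 from the cell just written (x2/x3 start at 0, as Python's i=0/j=0 guards)
def pvPrefRow : List Int → List Int → Int → Int → List Int
  | d :: ds, p :: ps, x2, x3 =>
      (d + p + x2 - x3) :: pvPrefRow ds ps (d + p + x2 - x3) p
  | _, _, _, _ => []

-- outer i-loop: each output row is built from diff row i and the previous output row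
def pvPrefRows : List (List Int) → List Int → List (List Int)
  | [], _ => []
  | d :: ds, prev =>
      let r := pvPrefRow d prev 0 0
      r :: pvPrefRows ds r

def rangeAddQueries (n : Int) (queries : List (List Int)) : List (List Int) :=
  let m := (n + 1).toNat
  let diff := queries.foldl pvApplyQuery (List.replicate m (List.replicate m (0 : Int)))
  -- the prefix loops read diff[i][j] only for i, j < n
  pvPrefRows ((diff.take n.toNat).map (fun row => row.take n.toNat)) (List.replicate n.toNat 0)

-- ===== PORT B =====
-- inner j-loop of one query: retVal[i][j] += 1 for j in range(col1, col2+1); exact for the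
-- nonnegative in-range indices Pre_ guarantees (List.modify is the identity out of range)
def pvRowInc (row : List Int) (col1 col2 : Int) : List Int :=
  (PySem.List.pyRange col1 (col2 + 1) 1).foldl (fun r j => r.modify j.toNat (fun x => x + 1)) row

-- one query: bump every cell of its rectangle (Python unpacking raises on other arities;
-- unreachable under Pre_)
def pvAddRect (g : List (List Int)) (q : List Int) : List (List Int) :=
  match q with
  | [row1, col1, row2, col2] =>
      (PySem.List.pyRange row1 (row2 + 1) 1).foldl
        (fun g i => g.modify i.toNat (fun row => pvRowInc row col1 col2)) g
  | _ => g

def rangeAddQueries_alt (n : Int) (queries : List (List Int)) : List (List Int) :=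
  queries.foldl pvAddRect (List.replicate n.toNat (List.replicate n.toNat (0 : Int)))

-- ===== PRECONDITION & SPEC =====
-- q is a well-formed query of LeetCode 2536's contract: [r1,c1,r2,c2] with 0 ≤ r1 ≤ r2 < n, 0 ≤ c1 ≤ c2 < n
def pvNatural (n : Int) (q : List Int) : Prop :=
  q.length = 4 ∧
  0 ≤ q.getD 0 0 ∧ q.getD 0 0 ≤ q.getD 2 0 ∧ q.getD 2 0 < n ∧
  0 ≤ q.getD 1 0 ∧ q.getD 1 0 ≤ q.getD 3 0 ∧ q.getD 3 0 < n

-- Pre_ excludes queries outside the problem's contract (wrong arity, coordinates outside the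
-- grid, inverted rectangles): A raises on most of them, and on the few where Python's
-- negative-index wraparound or an empty rectangle still lets both programs return, neither
-- value is specified and the two accidental results need not agree.
def Pre_rangeAddQueries (n : Int) (queries : List (List Int)) : Prop :=
  ∀ q ∈ queries, pvNatural n q

instance (n : Int) (queries : List (List Int)) : Decidable (Pre_rangeAddQueries n queries) := by
  unfold Pre_rangeAddQueries pvNatural; infer_instance

def pvWitness_rangeAddQueries : Int × List (List Int) := (3, [[0, 0, 1, 1], [1, 1, 2, 2]])

def Spec_rangeAddQueries (n : Int) (queries : List (List Int)) (out : List (List Int)) : Prop := out = rangeAddQueries_alt n queries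
instance (n : Int) (queries : List (List Int)) (out : List (List Int)) : Decidable (Spec_rangeAddQueries n queries out) := by unfold Spec_rangeAddQueries; infer_instance

-- ===== CLAIM (what is proved, stated in full; the proofs are below) =====
def Claim_equal_rangeAddQueries : Prop := ∀ (n : Int) (queries : List (List Int)), Dom_rangeAddQueries n queries → Pre_rangeAddQueries n queries → Spec_rangeAddQueries n queries (rangeAddQueries n queries)


-- ===== LEMMAS AND PROOFS =====

-- read cell (a, b) of a grid, 0 outside
def pvRead (g : List (List Int)) (a b : Nat) : Int := (g.getD a []).getD b 0

-- the grid is m × m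
def pvShape (m : Nat) (g : List (List Int)) : Prop :=
  g.length = m ∧ ∀ a, a < m → (g.getD a []).length = m

-- the net contribution of one query's four corner updates to cell (a, b)
def pvDelta (q : List Int) (a b : Nat) : Int :=
  match q with
  | [row1, col1, row2, col2] =>
      ((if (a : Int) = row1 then 1 else 0) - (if (a : Int) = row2 + 1 then 1 else 0)) *
      ((if (b : Int) = col1 then 1 else 0) - (if (b : Int) = col2 + 1 then 1 else 0))
  | _ => 0

-- does query q cover cell (i, j)?  (proof-side characterisation shared by both ports)
def pvCovers (q : List Int) (i j : Int) : Bool :=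
  match q with
  | [row1, col1, row2, col2] => decide (row1 ≤ i ∧ i ≤ row2 ∧ col1 ≤ j ∧ j ≤ col2)
  | _ => false

theorem pvGetD_modify {α : Type} (l : List α) (i j : Nat) (f : α → α) (d : α) :
    (l.modify i f).getD j d = if i = j ∧ j < l.length then f (l.getD j d) else l.getD j d := by
  rcases Nat.lt_or_ge j l.length with h | h
  · by_cases hij : i = j
    · subst hij
      simp [List.getD_eq_getElem?_getD, List.getElem?_modify, h]
    · simp [List.getD_eq_getElem?_getD, List.getElem?_modify, hij]
  · have h2 : ¬ (i = j ∧ j < l.length) := by omega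
    simp [List.getD_eq_getElem?_getD, List.getElem?_modify, h2, List.getElem?_eq_none_iff.mpr h]

theorem pvBump_read (g : List (List Int)) (i j v : Int) (a b : Nat) :
    pvRead (pvBump g i j v) a b =
      if i.toNat = a ∧ a < g.length ∧ j.toNat = b ∧ b < (g.getD a []).length
      then pvRead g a b + v else pvRead g a b := by
  unfold pvRead pvBump
  rw [pvGetD_modify]
  by_cases h1 : i.toNat = a ∧ a < g.length
  · rw [if_pos h1, pvGetD_modify]
    by_cases h2 : j.toNat = b ∧ b < (g.getD a []).length
    · rw [if_pos h2, if_pos ⟨h1.1, h1.2, h2.1, h2.2⟩]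
    · rw [if_neg h2, if_neg (by tauto)]
  · rw [if_neg h1, if_neg (by tauto)]

theorem pvBump_shape (m : Nat) (g : List (List Int)) (i j v : Int) (h : pvShape m g) :
    pvShape m (pvBump g i j v) := by
  obtain ⟨hl, hr⟩ := h
  refine ⟨by simpa [pvBump] using hl, fun a ha => ?_⟩
  unfold pvBump
  rw [pvGetD_modify]
  split_ifs with h1
  · simpa using hr a ha
  · exact hr a ha

theorem pvBump_read' (m : Nat) (g : List (List Int)) (i j v : Int) (a b : Nat)
    (hg : pvShape m g) (ha : a < m) (hb : b < m) (hi : 0 ≤ i) (hj : 0 ≤ j) :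
    pvRead (pvBump g i j v) a b =
      pvRead g a b + (if (a : Int) = i ∧ (b : Int) = j then v else 0) := by
  rw [pvBump_read]
  have hga : a < g.length := hg.1 ▸ ha
  have hrow : (g.getD a []).length = m := hg.2 a ha
  by_cases hc : (a : Int) = i ∧ (b : Int) = j
  · rw [if_pos ⟨by omega, hga, by omega, by omega⟩, if_pos hc]
  · rw [if_neg ?_, if_neg hc, add_zero]
    rintro ⟨e1, _, e2, _⟩
    exact hc ⟨by omega, by omega⟩

theorem pvApplyQuery_shape (m : Nat) (g : List (List Int)) (q : List Int) (h : pvShape m g) :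
    pvShape m (pvApplyQuery g q) := by
  unfold pvApplyQuery
  rcases q with _ | ⟨r1, _ | ⟨c1, _ | ⟨r2, _ | ⟨c2, _ | ⟨x, t⟩⟩⟩⟩⟩ <;>
    first
      | exact h
      | exact pvBump_shape _ _ _ _ _ (pvBump_shape _ _ _ _ _ (pvBump_shape _ _ _ _ _ (pvBump_shape _ _ _ _ _ h)))

theorem pvApplyQuery_read (n : Int) (m : Nat) (hm : m = (n + 1).toNat)
    (g : List (List Int)) (q : List Int) (hq : pvNatural n q) (hg : pvShape m g)
    (a b : Nat) (ha : a < m) (hb : b < m) :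
    pvRead (pvApplyQuery g q) a b = pvRead g a b + pvDelta q a b := by
  obtain ⟨hlen, h0, h02, h2n, h1, h13, h3n⟩ := hq
  rcases q with _ | ⟨r1, _ | ⟨c1, _ | ⟨r2, _ | ⟨c2, _ | ⟨x, t⟩⟩⟩⟩⟩ <;>
    simp only [List.length_cons, List.length_nil] at hlen <;> try omega
  simp only [List.getD_cons_zero, List.getD_cons_succ] at h0 h02 h2n h1 h13 h3n
  have hs1 := pvBump_shape m g r1 c1 1 hg
  have hs2 := pvBump_shape m _ (r2+1) c1 (-1) hs1
  have hs3 := pvBump_shape m _ r1 (c2+1) (-1) hs2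
  unfold pvApplyQuery
  rw [pvBump_read' m _ _ _ _ _ _ hs3 ha hb (by omega) (by omega),
      pvBump_read' m _ _ _ _ _ _ hs2 ha hb (by omega) (by omega),
      pvBump_read' m _ _ _ _ _ _ hs1 ha hb (by omega) (by omega),
      pvBump_read' m _ _ _ _ _ _ hg ha hb (by omega) (by omega)]
  simp only [pvDelta]
  have e1 : r1 ≠ r2 + 1 := by omega
  have e2 : r1 ≠ 1 + r2 := by omega
  have e3 : c1 ≠ c2 + 1 := by omega
  have e4 : c1 ≠ 1 + c2 := by omega
  have e5 : r2 + 1 ≠ r1 := by omega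
  have e6 : 1 + r2 ≠ r1 := by omega
  have e7 : c2 + 1 ≠ c1 := by omega
  have e8 : 1 + c2 ≠ c1 := by omega
  by_cases hA1 : (a : Int) = r1 <;> by_cases hA2 : (a : Int) = r2 + 1 <;>
    by_cases hB1 : (b : Int) = c1 <;> by_cases hB2 : (b : Int) = c2 + 1 <;>
    (try (exfalso; omega)) <;> simp [hA1, hA2, hB1, hB2, e1, e2, e3, e4, e5, e6, e7, e8] <;> try ring

theorem pvDiff_read (n : Int) (m : Nat) (hm : m = (n + 1).toNat)
    (qs : List (List Int)) (hqs : ∀ q ∈ qs, pvNatural n q)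
    (g : List (List Int)) (hg : pvShape m g)
    (a b : Nat) (ha : a < m) (hb : b < m) :
    pvRead (qs.foldl pvApplyQuery g) a b =
      pvRead g a b + (qs.map (fun q => pvDelta q a b)).sum := by
  induction qs generalizing g with
  | nil => simp
  | cons q qs ih =>
    simp only [List.foldl_cons, List.map_cons, List.sum_cons]
    rw [ih (fun p hp => hqs p (by simp [hp])) _ (pvApplyQuery_shape m g q hg),
        pvApplyQuery_read n m hm g q (hqs q (by simp)) hg a b ha hb]
    ring

theorem pvPrefRow_length (ds : List Int) : ∀ (ps : List Int) (x2 x3 : Int),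
    (pvPrefRow ds ps x2 x3).length = min ds.length ps.length := by
  induction ds with
  | nil => intro ps x2 x3; cases ps <;> simp [pvPrefRow]
  | cons d ds ih => intro ps x2 x3; cases ps <;> simp [pvPrefRow, ih] <;> omega

theorem pvPrefRow_getD (ds : List Int) : ∀ (ps : List Int) (x2 x3 : Int) (j : Nat),
    j < ds.length → j < ps.length →
    (pvPrefRow ds ps x2 x3).getD j 0 = ps.getD j 0 + (x2 - x3) + (ds.take (j + 1)).sum := by
  induction ds with
  | nil => intro ps x2 x3 j h1 h2; simp at h1
  | cons d ds ih =>
    intro ps x2 x3 j h1 h2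
    cases ps with
    | nil => simp at h2
    | cons p ps =>
      cases j with
      | zero => simp [pvPrefRow]; ring
      | succ j =>
        simp only [pvPrefRow, List.getD_cons_succ]
        rw [ih ps _ _ j (by simpa using h1) (by simpa using h2)]
        simp [List.take_succ_cons]
        ring

theorem pvPrefRows_length (dss : List (List Int)) : ∀ (prev : List Int),
    (pvPrefRows dss prev).length = dss.length := by
  induction dss with
  | nil => intro prev; simp [pvPrefRows]
  | cons d ds ih => intro prev; simp [pvPrefRows, ih]

theorem pvPrefRows_rowlen (N : Nat) (dss : List (List Int)) : ∀ (prev : List Int) (i : Nat),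
    i < dss.length → (∀ d ∈ dss, d.length = N) → prev.length = N →
    ((pvPrefRows dss prev).getD i []).length = N := by
  induction dss with
  | nil => intro prev i h1 _ _; simp at h1
  | cons d ds ih =>
    intro prev i h1 h2 h3
    have hd : d.length = N := h2 d (by simp)
    have hr : (pvPrefRow d prev 0 0).length = N := by
      rw [pvPrefRow_length, hd, h3]; omega
    cases i with
    | zero => simpa [pvPrefRows] using hr
    | succ i =>
      simp only [pvPrefRows, List.getD_cons_succ]
      exact ih _ i (by simpa using h1) (fun x hx => h2 x (by simp [hx])) hr

theorem pvPrefRows_getD (N : Nat) (dss : List (List Int)) : ∀ (prev : List Int) (i j : Nat),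
    i < dss.length → (∀ d ∈ dss, d.length = N) → prev.length = N → j < N →
    ((pvPrefRows dss prev).getD i []).getD j 0 =
      prev.getD j 0 + ((dss.take (i + 1)).map (fun d => (d.take (j + 1)).sum)).sum := by
  induction dss with
  | nil => intro prev i j h1 _ _ _; simp at h1
  | cons d ds ih =>
    intro prev i j h1 h2 h3 hj
    have hd : d.length = N := h2 d (by simp)
    have hrow := pvPrefRow_getD d prev 0 0 j (by omega) (by omega)
    have hrlen : (pvPrefRow d prev 0 0).length = N := by
      rw [pvPrefRow_length, hd, h3]; omega
    cases i with
    | zero =>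
      simp only [pvPrefRows, List.getD_cons_zero, List.take_succ_cons, List.take_zero,
        List.map_cons, List.map_nil, List.sum_cons, List.sum_nil]
      rw [hrow]; ring
    | succ i =>
      simp only [pvPrefRows, List.getD_cons_succ, List.take_succ_cons, List.map_cons,
        List.sum_cons]
      rw [ih _ i j (by simpa using h1) (fun x hx => h2 x (by simp [hx])) hrlen hj, hrow]
      ring

theorem pvSumInd (k : Nat) (r : Int) (hr : 0 ≤ r) :
    ((List.range k).map (fun (a : Nat) => if (a : Int) = r then (1 : Int) else 0)).sum =
      if r < (k : Int) then 1 else 0 := by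
  induction k with
  | zero => simp; omega
  | succ k ih =>
    rw [List.range_succ, List.map_append, List.sum_append, ih]
    simp only [List.map_cons, List.map_nil, List.sum_cons, List.sum_nil]
    by_cases h : (k : Int) = r
    · rw [if_pos h, if_neg (by omega), if_pos (by push_cast; omega)]
      omega
    · rw [if_neg h]
      by_cases h2 : r < (k : Int)
      · rw [if_pos h2, if_pos (by push_cast; omega)]
        omega
      · rw [if_neg h2, if_neg (by push_cast; omega)]
        omega

theorem pvSumSub (l : List Nat) (f g : Nat → Int) :
    (l.map (fun x => f x - g x)).sum = (l.map f).sum - (l.map g).sum := by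
  have h1 : (fun x => f x - g x) = (fun x => f x + (-1) * g x) := by funext x; ring
  rw [h1, PySem.List.sum_map_add_int, PySem.List.sum_map_const_mul_int]
  ring

theorem pvDelta_boxsum (n : Int) (q : List Int) (hq : pvNatural n q) (i j : Nat) :
    ((List.range (i + 1)).map (fun (a : Nat) =>
      ((List.range (j + 1)).map (fun (b : Nat) => pvDelta q a b)).sum)).sum =
      if pvCovers q (i : Int) (j : Int) then 1 else 0 := by
  obtain ⟨hlen, h0, h02, h2n, h1, h13, h3n⟩ := hq
  rcases q with _ | ⟨r1, _ | ⟨c1, _ | ⟨r2, _ | ⟨c2, _ | ⟨x, t⟩⟩⟩⟩⟩ <;>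
    simp only [List.length_cons, List.length_nil] at hlen <;> try omega
  simp only [List.getD_cons_zero, List.getD_cons_succ] at h0 h02 h2n h1 h13 h3n
  have hC : ((List.range (j + 1)).map (fun (b : Nat) =>
      (if (b : Int) = c1 then (1 : Int) else 0) - (if (b : Int) = c2 + 1 then 1 else 0))).sum =
      (if c1 < ((j + 1 : Nat) : Int) then 1 else 0) - (if c2 + 1 < ((j + 1 : Nat) : Int) then 1 else 0) := by
    rw [pvSumSub, pvSumInd _ _ h1, pvSumInd _ _ (by omega)]
  have hstep : ∀ a : Nat, ((List.range (j + 1)).map (fun (b : Nat) => pvDelta [r1, c1, r2, c2] a b)).sum =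
      ((if (a : Int) = r1 then (1 : Int) else 0) - (if (a : Int) = r2 + 1 then 1 else 0)) *
      ((if c1 < ((j + 1 : Nat) : Int) then 1 else 0) - (if c2 + 1 < ((j + 1 : Nat) : Int) then 1 else 0)) := by
    intro a
    rw [← hC, ← PySem.List.sum_map_const_mul_int]
    simp only [pvDelta]
  simp only [hstep]
  rw [show (fun (a : Nat) => ((if (a : Int) = r1 then (1 : Int) else 0) - (if (a : Int) = r2 + 1 then 1 else 0)) *
      ((if c1 < ((j + 1 : Nat) : Int) then 1 else 0) - (if c2 + 1 < ((j + 1 : Nat) : Int) then 1 else 0))) =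
      (fun (a : Nat) => ((if c1 < ((j + 1 : Nat) : Int) then 1 else 0) - (if c2 + 1 < ((j + 1 : Nat) : Int) then 1 else 0)) *
      ((if (a : Int) = r1 then (1 : Int) else 0) - (if (a : Int) = r2 + 1 then 1 else 0))) from by funext a; ring,
    PySem.List.sum_map_const_mul_int, pvSumSub, pvSumInd _ _ h0, pvSumInd _ _ (by omega)]
  by_cases hA : r1 ≤ (i : Int) <;> by_cases hB : (i : Int) ≤ r2 <;>
    by_cases hc : c1 ≤ (j : Int) <;> by_cases hd : (j : Int) ≤ c2 <;>
    rw [if_congr (show r1 < ((i + 1 : Nat) : Int) ↔ r1 ≤ (i : Int) from by push_cast; omega) rfl rfl,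
        if_congr (show r2 + 1 < ((i + 1 : Nat) : Int) ↔ ¬ ((i : Int) ≤ r2) from by push_cast; omega) rfl rfl,
        if_congr (show c1 < ((j + 1 : Nat) : Int) ↔ c1 ≤ (j : Int) from by push_cast; omega) rfl rfl,
        if_congr (show c2 + 1 < ((j + 1 : Nat) : Int) ↔ ¬ ((j : Int) ≤ c2) from by push_cast; omega) rfl rfl] <;>
    simp [pvCovers, hA, hB, hc, hd] <;> omega


theorem pvTakeMapSum {α : Type} (f : α → Int) (dflt : α) (l : List α) : ∀ (k : Nat), k ≤ l.length →
    ((l.take k).map f).sum = ((List.range k).map (fun (a : Nat) => f (l.getD a dflt))).sum := by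
  induction l with
  | nil => intro k hk; simp at hk; simp [hk]
  | cons x xs ih =>
    intro k hk
    cases k with
    | zero => simp
    | succ k =>
      rw [List.take_succ_cons, List.map_cons, List.sum_cons, List.range_succ_eq_map]
      simp only [List.map_cons, List.sum_cons, List.getD_cons_zero, List.map_map]
      rw [ih k (by simpa using hk)]
      congr 1

theorem pvSwapSum (l1 : List Nat) (qs : List (List Int)) (F : List Int → Nat → Int) :
    (l1.map (fun (a : Nat) => (qs.map (fun q => F q a)).sum)).sum =
      (qs.map (fun q => (l1.map (fun (a : Nat) => F q a)).sum)).sum := by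
  induction qs with
  | nil => simp
  | cons q qs ih =>
    simp only [List.map_cons, List.sum_cons, PySem.List.sum_map_add_int, ih]

theorem pvReadZeroGrid (m a b : Nat) :
    pvRead (List.replicate m (List.replicate m (0 : Int))) a b = 0 := by
  unfold pvRead
  simp [List.getD_eq_getElem?_getD, List.getElem?_replicate]
  split_ifs <;> simp [List.getD_eq_getElem?_getD, List.getElem?_replicate] <;> split_ifs <;> simp

theorem pvFoldShape (m : Nat) (qs : List (List Int)) : ∀ (g : List (List Int)), pvShape m g →
    pvShape m (qs.foldl pvApplyQuery g) := by
  induction qs with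
  | nil => intro g hg; exact hg
  | cons q qs ih => intro g hg; exact ih _ (pvApplyQuery_shape m g q hg)

theorem pvZeroShape (m : Nat) : pvShape m (List.replicate m (List.replicate m (0 : Int))) := by
  refine ⟨by simp, fun a ha => ?_⟩
  rw [List.getD_eq_getElem?_getD, List.getElem?_replicate]
  simp [ha]

theorem pvTakeRows (m N : Nat) (g : List (List Int)) (hg : pvShape m g) (hNm : N ≤ m) :
    ∀ d ∈ (g.take N).map (fun row => row.take N), d.length = N := by
  intro d hd
  obtain ⟨row, hrow, rfl⟩ := List.mem_map.mp hd
  obtain ⟨k, hk, rfl⟩ := List.mem_iff_getElem.mp (List.mem_of_mem_take hrow)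
  have heq : g.getD k [] = g[k] := by
    rw [List.getD_eq_getElem?_getD, List.getElem?_eq_getElem hk]; rfl
  have hlen : (g[k]).length = m := by
    rw [← heq]; exact hg.2 k (by have h := hg.1; omega)
  simp [hlen]; omega

theorem pvEntry (n : Int) (qs : List (List Int)) (hqs : ∀ q ∈ qs, pvNatural n q)
    (i j : Nat) (hi : i < n.toNat) (hj : j < n.toNat) :
    pvRead (rangeAddQueries n qs) i j =
      (qs.map (fun q => if pvCovers q (i : Int) (j : Int) then (1 : Int) else 0)).sum := by
  have hNm : n.toNat ≤ (n + 1).toNat := by omega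
  set N := n.toNat with hN
  set m := (n + 1).toNat with hm
  set diff := qs.foldl pvApplyQuery (List.replicate m (List.replicate m (0 : Int))) with hdiff
  have hshape : pvShape m diff := pvFoldShape m qs _ (pvZeroShape m)
  have hrow_len : ∀ a : Nat, a < m → (diff.getD a []).length = m := hshape.2
  have hdiff_len : diff.length = m := hshape.1
  have hdef : rangeAddQueries n qs =
      pvPrefRows ((diff.take N).map (fun row => row.take N)) (List.replicate N 0) := rfl
  set dss := (diff.take N).map (fun row => row.take N) with hdss
  have hdss_len : dss.length = N := by
    simp [hdss, hdiff_len]; omega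
  have hdss_rows : ∀ d ∈ dss, d.length = N := pvTakeRows m N diff hshape hNm
  rw [hdef]
  unfold pvRead
  rw [pvPrefRows_getD N dss (List.replicate N 0) i j (by omega) hdss_rows (by simp) hj]
  rw [List.getD_eq_getElem?_getD, List.getElem?_replicate]
  simp only [hj, if_pos, Option.getD_some]
  -- Σ over the first i+1 truncated diff rows of their first j+1 entries
  rw [hdss, ← List.map_take, List.take_take, List.map_map,
      show min (i + 1) N = i + 1 from by omega]
  rw [pvTakeMapSum _ [] diff (i + 1) (by omega)]
  -- inner: truncated-row sums as range sums over diff reads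
  rw [List.map_congr_left (fun a (ha : a ∈ List.range (i + 1)) => by
    have ha' : a < i + 1 := List.mem_range.mp ha
    show ((fun row => (row.take (j + 1)).sum) ∘ fun row => row.take N) (diff.getD a []) =
      ((List.range (j + 1)).map (fun (b : Nat) => pvRead diff a b)).sum
    have h1 : ((diff.getD a []).take N).take (j + 1) = (diff.getD a []).take (j + 1) := by
      rw [List.take_take, show min (j + 1) N = j + 1 from by omega]
    have h2 := pvTakeMapSum id (0 : Int) (diff.getD a []) (j + 1)
      (by rw [hrow_len a (by omega)]; omega)
    simp only [Function.comp, h1]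
    simpa [pvRead] using h2)]
  -- each read is the query delta sum
  rw [List.map_congr_left (fun a (ha : a ∈ List.range (i + 1)) => by
    have ha' : a < i + 1 := List.mem_range.mp ha
    show ((List.range (j + 1)).map (fun (b : Nat) => pvRead diff a b)).sum =
      ((List.range (j + 1)).map (fun (b : Nat) => (qs.map (fun q => pvDelta q a b)).sum)).sum
    refine congrArg _ (List.map_congr_left (fun b hb => ?_))
    have hb' : b < j + 1 := List.mem_range.mp hb
    rw [hdiff, pvDiff_read n m hm.symm qs hqs _ (pvZeroShape m) a b (by omega) (by omega),
        pvReadZeroGrid, zero_add])]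
  -- swap the two outer sums with the query sum
  rw [show (fun (a : Nat) => ((List.range (j + 1)).map (fun (b : Nat) => (qs.map (fun q => pvDelta q a b)).sum)).sum) =
      (fun (a : Nat) => (qs.map (fun q => ((List.range (j + 1)).map (fun (b : Nat) => pvDelta q a b)).sum)).sum) from
    funext (fun a => pvSwapSum (List.range (j + 1)) qs (fun q b => pvDelta q a b)),
    pvSwapSum (List.range (i + 1)) qs
      (fun q a => ((List.range (j + 1)).map (fun (b : Nat) => pvDelta q a b)).sum)]
  -- per query: the box sum is the cover bit
  rw [List.map_congr_left (fun q hq => pvDelta_boxsum n q (hqs q hq) i j)]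
  rw [zero_add]

-- B-side characterisation ---------------------------------------------------

theorem pvFoldModLen (L : List Int) : ∀ (row : List Int),
    (L.foldl (fun r j => r.modify j.toNat (fun x => x + 1)) row).length = row.length := by
  induction L with
  | nil => intro row; rfl
  | cons x L ih => intro row; simp [ih, List.length_modify]

theorem pvRowInc_getD (k : Nat) : ∀ (lo hi : Int), (hi - lo).toNat = k → 0 ≤ lo →
    ∀ (row : List Int) (b : Nat),
    ((PySem.List.pyRange lo hi 1).foldl (fun r j => r.modify j.toNat (fun x => x + 1)) row).getD b 0 =
      row.getD b 0 +
        (if lo ≤ (b : Int) ∧ (b : Int) < hi ∧ b < row.length then 1 else 0) := by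
  induction k with
  | zero =>
    intro lo hi hk hlo row b
    have hhl : hi ≤ lo := by omega
    rw [PySem.List.pyRange_one, show (hi - lo).toNat = 0 from hk]
    simp only [List.range_zero, List.map_nil, List.foldl_nil]
    rw [if_neg (by omega)]
    omega
  | succ k ih =>
    intro lo hi hk hlo row b
    have hlt : lo < hi := by omega
    rw [PySem.List.pyRange_one_cons hlt, List.foldl_cons]
    rw [ih (lo + 1) hi (by omega) (by omega)]
    rw [List.length_modify, pvGetD_modify]
    by_cases h1 : lo.toNat = b ∧ b < row.length
    · rw [if_pos h1]
      have hb : (b : Int) = lo := by omega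
      rw [if_neg (by omega), if_pos ⟨by omega, by omega, h1.2⟩]
      ring
    · rw [if_neg h1]
      by_cases h2 : lo + 1 ≤ (b : Int) ∧ (b : Int) < hi ∧ b < row.length
      · rw [if_pos h2, if_pos ⟨by omega, by omega, h2.2.2⟩]
      · rw [if_neg h2, if_neg (by omega)]

theorem pvRowInc_len (row : List Int) (c1 c2 : Int) :
    (pvRowInc row c1 c2).length = row.length := pvFoldModLen _ row

theorem pvRectFold_shape (N : Nat) (c1 c2 : Int) (L : List Int) : ∀ (g : List (List Int)),
    pvShape N g →
    pvShape N (L.foldl (fun g i => g.modify i.toNat (fun row => pvRowInc row c1 c2)) g) := by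
  induction L with
  | nil => intro g hg; exact hg
  | cons x L ih =>
    intro g hg
    refine ih _ ⟨by simpa [List.length_modify] using hg.1, fun a ha => ?_⟩
    rw [pvGetD_modify]
    split_ifs with h1
    · rw [pvRowInc_len]; exact hg.2 a ha
    · exact hg.2 a ha

theorem pvRectFold_read (N : Nat) (c1 c2 : Int) (hc1 : 0 ≤ c1) (k : Nat) :
    ∀ (lo hi : Int), (hi - lo).toNat = k → 0 ≤ lo →
    ∀ (g : List (List Int)), pvShape N g → ∀ (a b : Nat), a < N → b < N →
    pvRead ((PySem.List.pyRange lo hi 1).foldl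
        (fun g i => g.modify i.toNat (fun row => pvRowInc row c1 c2)) g) a b =
      pvRead g a b +
        (if lo ≤ (a : Int) ∧ (a : Int) < hi ∧ c1 ≤ (b : Int) ∧ (b : Int) < c2 + 1
         then 1 else 0) := by
  induction k with
  | zero =>
    intro lo hi hk hlo g hg a b ha hb
    rw [PySem.List.pyRange_one, show (hi - lo).toNat = 0 from hk]
    simp only [List.range_zero, List.map_nil, List.foldl_nil]
    rw [if_neg (by omega)]
    omega
  | succ k ih =>
    intro lo hi hk hlo g hg a b ha hb
    have hlt : lo < hi := by omega
    set g' := g.modify lo.toNat (fun row => pvRowInc row c1 c2) with hg'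
    have hshape' : pvShape N g' := by
      refine ⟨by rw [hg', List.length_modify]; exact hg.1, fun x hx => ?_⟩
      rw [hg', pvGetD_modify]
      split_ifs with h1
      · rw [pvRowInc_len]; exact hg.2 x hx
      · exact hg.2 x hx
    rw [PySem.List.pyRange_one_cons hlt, List.foldl_cons]
    rw [ih (lo + 1) hi (by omega) (by omega) g' hshape' a b ha hb]
    have hga : a < g.length := by rw [hg.1]; omega
    have hrow : (g.getD a []).length = N := hg.2 a ha
    have hread : pvRead g' a b = pvRead g a b +
        (if lo = (a : Int) ∧ c1 ≤ (b : Int) ∧ (b : Int) < c2 + 1 then 1 else 0) := by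
      rw [pvRead, hg', pvGetD_modify]
      by_cases h1 : lo.toNat = a ∧ a < g.length
      · rw [if_pos h1, pvRowInc,
            pvRowInc_getD ((c2 + 1 - c1).toNat) c1 (c2 + 1) rfl hc1 (g.getD a []) b]
        by_cases h2 : c1 ≤ (b : Int) ∧ (b : Int) < c2 + 1
        · rw [if_pos ⟨h2.1, h2.2, by omega⟩, if_pos ⟨by omega, h2⟩]; simp [pvRead]
        · rw [if_neg (by omega), if_neg (by omega)]; simp [pvRead]
      · rw [if_neg h1, if_neg (by omega)]; simp [pvRead]
    rw [hread]
    split_ifs <;> omega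

theorem pvAddRect_shape (N : Nat) (g : List (List Int)) (q : List Int) (hg : pvShape N g) :
    pvShape N (pvAddRect g q) := by
  unfold pvAddRect
  rcases q with _ | ⟨r1, _ | ⟨c1, _ | ⟨r2, _ | ⟨c2, _ | ⟨x, t⟩⟩⟩⟩⟩ <;>
    first
      | exact hg
      | exact pvRectFold_shape N c1 c2 _ g hg

theorem pvAddRect_read (n : Int) (N : Nat) (hN : N = n.toNat)
    (g : List (List Int)) (q : List Int) (hq : pvNatural n q) (hg : pvShape N g)
    (a b : Nat) (ha : a < N) (hb : b < N) :
    pvRead (pvAddRect g q) a b =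
      pvRead g a b + (if pvCovers q (a : Int) (b : Int) then 1 else 0) := by
  obtain ⟨hlen, h0, h02, h2n, h1, h13, h3n⟩ := hq
  rcases q with _ | ⟨r1, _ | ⟨c1, _ | ⟨r2, _ | ⟨c2, _ | ⟨x, t⟩⟩⟩⟩⟩ <;>
    simp only [List.length_cons, List.length_nil] at hlen <;> try omega
  simp only [List.getD_cons_zero, List.getD_cons_succ] at h0 h02 h2n h1 h13 h3n
  unfold pvAddRect
  rw [pvRectFold_read N c1 c2 (by omega) ((r2 + 1 - r1).toNat) r1 (r2 + 1) rfl (by omega)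
      g hg a b ha hb]
  by_cases hcov : r1 ≤ (a : Int) ∧ (a : Int) ≤ r2 ∧ c1 ≤ (b : Int) ∧ (b : Int) ≤ c2
  · rw [if_pos (by omega), show pvCovers [r1, c1, r2, c2] (a : Int) (b : Int) = true from by
      simp [pvCovers]; omega]
    rfl
  · rw [if_neg (by omega), show pvCovers [r1, c1, r2, c2] (a : Int) (b : Int) = false from by
      simp [pvCovers]; omega]
    rfl

theorem pvBFold_read (n : Int) (N : Nat) (hN : N = n.toNat)
    (qs : List (List Int)) (hqs : ∀ q ∈ qs, pvNatural n q) :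
    ∀ (g : List (List Int)), pvShape N g → ∀ (a b : Nat), a < N → b < N →
    pvRead (qs.foldl pvAddRect g) a b =
      pvRead g a b + (qs.map (fun q => if pvCovers q (a : Int) (b : Int) then (1 : Int) else 0)).sum := by
  induction qs with
  | nil => intro g hg a b ha hb; simp
  | cons q qs ih =>
    intro g hg a b ha hb
    simp only [List.foldl_cons, List.map_cons, List.sum_cons]
    rw [ih (fun p hp => hqs p (by simp [hp])) _ (pvAddRect_shape N g q hg) a b ha hb,
        pvAddRect_read n N hN g q (hqs q (by simp)) hg a b ha hb]
    ring

theorem pvEntryB (n : Int) (qs : List (List Int)) (hqs : ∀ q ∈ qs, pvNatural n q)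
    (i j : Nat) (hi : i < n.toNat) (hj : j < n.toNat) :
    pvRead (rangeAddQueries_alt n qs) i j =
      (qs.map (fun q => if pvCovers q (i : Int) (j : Int) then (1 : Int) else 0)).sum := by
  unfold rangeAddQueries_alt
  rw [pvBFold_read n n.toNat rfl qs hqs _ (pvZeroShape n.toNat) i j hi hj,
      pvReadZeroGrid, zero_add]

theorem pvAltShape (n : Int) (qs : List (List Int)) :
    pvShape n.toNat (rangeAddQueries_alt n qs) := by
  unfold rangeAddQueries_alt
  have h : ∀ (qs : List (List Int)) (g : List (List Int)), pvShape n.toNat g →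
      pvShape n.toNat (qs.foldl pvAddRect g) := by
    intro qs
    induction qs with
    | nil => intro g hg; exact hg
    | cons q qs ih => intro g hg; exact ih _ (pvAddRect_shape n.toNat g q hg)
  exact h qs _ (pvZeroShape n.toNat)

theorem pvMain (n : Int) (qs : List (List Int)) (hqs : ∀ q ∈ qs, pvNatural n q) :
    rangeAddQueries n qs = rangeAddQueries_alt n qs := by
  have hNm : n.toNat ≤ (n + 1).toNat := by omega
  set N := n.toNat with hN
  set m := (n + 1).toNat with hm
  set diff := qs.foldl pvApplyQuery (List.replicate m (List.replicate m (0 : Int))) with hdiff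
  have hshape : pvShape m diff := pvFoldShape m qs _ (pvZeroShape m)
  set dss := (diff.take N).map (fun row => row.take N) with hdss
  have hdss_len : dss.length = N := by simp [hdss, hshape.1]; omega
  have hdss_rows : ∀ d ∈ dss, d.length = N := pvTakeRows m N diff hshape hNm
  have hdef : rangeAddQueries n qs = pvPrefRows dss (List.replicate N 0) := rfl
  have hshapeB : pvShape N (rangeAddQueries_alt n qs) := pvAltShape n qs
  have hlenA : (rangeAddQueries n qs).length = N := by
    rw [hdef, pvPrefRows_length, hdss_len]
  apply List.ext_getElem (by rw [hlenA, hshapeB.1])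
  intro i h1 h2
  have hiN : i < N := by omega
  have hAi : (rangeAddQueries n qs)[i] = (rangeAddQueries n qs).getD i [] := by
    rw [List.getD_eq_getElem?_getD, List.getElem?_eq_getElem h1]; rfl
  have hrowA : ((rangeAddQueries n qs)[i]).length = N := by
    rw [hAi, hdef]
    exact pvPrefRows_rowlen N dss _ i (by omega) hdss_rows (by simp)
  have hBi : (rangeAddQueries_alt n qs)[i] = (rangeAddQueries_alt n qs).getD i [] := by
    rw [List.getD_eq_getElem?_getD, List.getElem?_eq_getElem h2]; rfl
  have hrowB : ((rangeAddQueries_alt n qs)[i]).length = N := by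
    rw [hBi]; exact hshapeB.2 i hiN
  apply List.ext_getElem (by rw [hrowA, hrowB])
  intro j hj1 hj2
  have hjN : j < N := by rw [hrowA] at hj1; omega
  have hAij : ((rangeAddQueries n qs)[i])[j] = pvRead (rangeAddQueries n qs) i j := by
    rw [pvRead, ← hAi, List.getD_eq_getElem?_getD, List.getElem?_eq_getElem hj1]; rfl
  have hBij : ((rangeAddQueries_alt n qs)[i])[j] = pvRead (rangeAddQueries_alt n qs) i j := by
    rw [pvRead, ← hBi, List.getD_eq_getElem?_getD, List.getElem?_eq_getElem hj2]; rfl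
  rw [hAij, hBij, pvEntry n qs hqs i j hiN hjN, pvEntryB n qs hqs i j hiN hjN]

-- ===== VERDICT (by name: the statement is the Claim_ definition above) =====
theorem rangeAddQueries_spec : Claim_equal_rangeAddQueries := by
  intro n queries _ hpre
  unfold Spec_rangeAddQueries
  exact pvMain n queries hpre
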